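-- pv_equiv track=rewrite | github.com/csaund/gesture-to-language | data_analysis/GestureMovementHelpers.py | same_dir_theta
-- ===== SOURCE A (Python) =====
-- def same_dir_theta(ts):
--     same_dir = []
--     for i in range(1, len(ts)-1):
--         if ts[i-1] < ts[i] < ts[i+1]:
--             same_dir.append('d')
--         elif ts[i-1] > ts[i] > ts[i+1]:
--             same_dir.append('u')
--         else:
--             same_dir.append('-')
--     return same_dir
-- ===== SOURCE B (Python) =====
-- def same_dir_theta(ts):
--     less = [a < b for a, b in zip(ts, ts[1:])]
--     more = [a > b for a, b in zip(ts, ts[1:])]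
--     pairs = list(zip(less, more))
--     return ['d' if l1 and l2 else 'u' if m1 and m2 else '-'
--             for (l1, m1), (l2, m2) in zip(pairs, pairs[1:])]
-- ===== Notes on version B (the rewrite author's own statement) =====
-- stated objective: alternative
-- what changed: B replaces A's single indexed loop over triple lookups ts[i-1],ts[i],ts[i+1] by a two-pass decomposition: first precompute adjacent-pair comparison flags with zip, then combine consecutive flag pairs into labels.
import Mathlib
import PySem

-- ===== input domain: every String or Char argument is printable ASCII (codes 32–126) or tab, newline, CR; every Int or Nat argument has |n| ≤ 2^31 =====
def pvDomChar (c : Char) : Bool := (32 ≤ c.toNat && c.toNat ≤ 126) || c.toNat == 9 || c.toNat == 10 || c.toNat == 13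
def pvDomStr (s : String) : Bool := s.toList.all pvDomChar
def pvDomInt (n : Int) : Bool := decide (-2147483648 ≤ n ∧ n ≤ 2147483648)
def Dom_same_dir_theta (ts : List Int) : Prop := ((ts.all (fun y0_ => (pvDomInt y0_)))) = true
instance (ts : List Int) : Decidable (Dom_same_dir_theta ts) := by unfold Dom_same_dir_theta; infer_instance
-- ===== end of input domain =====

-- B labels interior elements by precomputing adjacent-pair comparison flags and combining them (alternative decomposition, same cost).

-- ===== PORT A =====
-- A: single indexed loop over range(1, len-1), appending per triple lookup.
def same_dir_theta (ts : List Int) : List String :=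
  (PySem.List.pyRange 1 ((ts.length : Int) - 1) 1).foldl
    (fun same_dir i =>
      if PySem.List.pyGetD ts (i-1) 0 < PySem.List.pyGetD ts i 0 ∧
         PySem.List.pyGetD ts i 0 < PySem.List.pyGetD ts (i+1) 0 then
        same_dir ++ ["d"]
      else if PySem.List.pyGetD ts (i-1) 0 > PySem.List.pyGetD ts i 0 ∧
              PySem.List.pyGetD ts i 0 > PySem.List.pyGetD ts (i+1) 0 then
        same_dir ++ ["u"]
      else
        same_dir ++ ["-"]) []

-- ===== PORT B =====
def same_dir_theta_alt (ts : List Int) : List String :=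
  let less := List.zipWith (fun a b => decide (a < b)) ts ts.tail
  let more := List.zipWith (fun a b => decide (a > b)) ts ts.tail
  let pairs := less.zip more
  List.zipWith
    (fun p q => if p.1 && q.1 then "d" else if p.2 && q.2 then "u" else "-")
    pairs pairs.tail

-- ===== PRECONDITION & SPEC =====
def Spec_same_dir_theta (ts : List Int) (out : List String) : Prop := out = same_dir_theta_alt ts
instance (ts : List Int) (out : List String) : Decidable (Spec_same_dir_theta ts out) := by unfold Spec_same_dir_theta; infer_instance

-- ===== CLAIM (what is proved, stated in full; the proofs are below) =====
def Claim_equal_same_dir_theta : Prop := ∀ (ts : List Int), Dom_same_dir_theta ts → Spec_same_dir_theta ts (same_dir_theta ts)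

-- ===== LEMMAS AND PROOFS =====

-- common structural form: one label per interior element
def pvTriples : List Int → List String
  | a :: b :: c :: rest =>
      (if a < b ∧ b < c then "d" else if a > b ∧ b > c then "u" else "-")
        :: pvTriples (b :: c :: rest)
  | _ => []

def pvLab (ts : List Int) (i : Int) : String :=
  if PySem.List.pyGetD ts (i-1) 0 < PySem.List.pyGetD ts i 0 ∧
     PySem.List.pyGetD ts i 0 < PySem.List.pyGetD ts (i+1) 0 then "d"
  else if PySem.List.pyGetD ts (i-1) 0 > PySem.List.pyGetD ts i 0 ∧
          PySem.List.pyGetD ts i 0 > PySem.List.pyGetD ts (i+1) 0 then "u"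
  else "-"

theorem pvA_eq_map (ts : List Int) :
    same_dir_theta ts
      = (PySem.List.pyRange 1 ((ts.length : Int) - 1) 1).map (pvLab ts) := by
  unfold same_dir_theta
  have h : (fun (same_dir : List String) (i : Int) =>
      if PySem.List.pyGetD ts (i-1) 0 < PySem.List.pyGetD ts i 0 ∧
         PySem.List.pyGetD ts i 0 < PySem.List.pyGetD ts (i+1) 0 then
        same_dir ++ ["d"]
      else if PySem.List.pyGetD ts (i-1) 0 > PySem.List.pyGetD ts i 0 ∧
              PySem.List.pyGetD ts i 0 > PySem.List.pyGetD ts (i+1) 0 then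
        same_dir ++ ["u"]
      else
        same_dir ++ ["-"])
      = (fun same_dir i => same_dir ++ [pvLab ts i]) := by
    funext acc i
    unfold pvLab
    split_ifs <;> rfl
  rw [h, PySem.List.foldl_append_singleton_eq_map]
  simp

theorem pvGetD_cons_shift (x : Int) (tl : List Int) (j : Int) (hj : 1 ≤ j) :
    PySem.List.pyGetD (x :: tl) j 0 = PySem.List.pyGetD tl (j - 1) 0 := by
  obtain ⟨k, rfl⟩ : ∃ k : Nat, j = (k : Int) + 1 := ⟨(j - 1).toNat, by omega⟩
  have e1 : ((k : Int) + 1) = ((k + 1 : Nat) : Int) := by push_cast; ring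
  have e2 : ((k : Int) + 1 - 1) = ((k : Nat) : Int) := by ring
  rw [e2, e1, PySem.List.pyGetD_natCast, PySem.List.pyGetD_natCast]
  rfl

theorem pvLab_cons_shift (x : Int) (tl : List Int) (i : Int) (hi : 2 ≤ i) :
    pvLab (x :: tl) i = pvLab tl (i - 1) := by
  unfold pvLab
  rw [pvGetD_cons_shift x tl (i-1) (by omega),
      pvGetD_cons_shift x tl i (by omega),
      pvGetD_cons_shift x tl (i+1) (by omega)]
  have h1 : i - 1 - 1 = (i - 1) - 1 := rfl
  have h2 : i + 1 - 1 = (i - 1) + 1 := by ring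
  rw [h2]

theorem pvMap_shift (g : Int → String) (a b : Int) :
    (PySem.List.pyRange a b 1).map (fun i => g (i - 1))
      = (PySem.List.pyRange (a-1) (b-1) 1).map g := by
  rw [PySem.List.pyRange_one, PySem.List.pyRange_one]
  have : b - a = (b - 1) - (a - 1) := by ring
  rw [← this]
  simp only [List.map_map]
  apply List.map_congr_left
  intro k _
  simp only [Function.comp_apply]
  congr 1
  ring

theorem pvMap_eq_triples (ts : List Int) :
    (PySem.List.pyRange 1 ((ts.length : Int) - 1) 1).map (pvLab ts) = pvTriples ts := by
  induction ts using pvTriples.induct with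
  | case1 a b c rest ih =>
    have hlen : ((a :: b :: c :: rest).length : Int) - 1 = (rest.length : Int) + 2 := by
      simp; ring
    rw [hlen, PySem.List.pyRange_one_cons (by omega)]
    have hhead : pvLab (a :: b :: c :: rest) 1
        = (if a < b ∧ b < c then "d" else if a > b ∧ b > c then "u" else "-") := by
      unfold pvLab
      norm_num [PySem.List.pyGetD_zero_cons]
      rw [show (2:Int) = ((2:Nat):Int) by norm_num,
          show (1:Int) = ((1:Nat):Int) by norm_num,
          PySem.List.pyGetD_natCast, PySem.List.pyGetD_natCast]
      rfl
    rw [List.map_cons, hhead]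
    norm_num
    congr 1
    have hcongr : (PySem.List.pyRange 2 ((rest.length : Int) + 2) 1).map
          (pvLab (a :: b :: c :: rest))
        = (PySem.List.pyRange 2 ((rest.length : Int) + 2) 1).map
          (fun i => pvLab (b :: c :: rest) (i - 1)) := by
      apply List.map_congr_left
      intro i hi
      rw [PySem.List.mem_pyRange_one] at hi
      exact pvLab_cons_shift a _ i (by omega)
    rw [hcongr, pvMap_shift]
    have h2 : ((rest.length : Int) + 2) - 1 = ((b :: c :: rest).length : Int) - 1 := by
      simp; ring
    rw [show (2:Int) - 1 = 1 by norm_num, h2]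
    exact ih
  | case2 ts h =>
    match ts, h with
    | [], _ => rfl
    | [_], _ => rfl
    | [_, _], _ => rfl
    | (a :: b :: c :: r), h => exact absurd rfl (h a b c r)

theorem pvAlt_eq_triples (ts : List Int) : same_dir_theta_alt ts = pvTriples ts := by
  induction ts using pvTriples.induct with
  | case1 a b c rest ih =>
    unfold same_dir_theta_alt at ih ⊢
    simp only [List.tail_cons, List.zipWith_cons_cons, List.zip_cons_cons,
      List.zipWith] at ih ⊢
    unfold pvTriples
    rw [← ih]
    congr 1
    by_cases h1 : a < b ∧ b < c
    · simp [h1.1, h1.2]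
    · by_cases h2 : a > b ∧ b > c
      · simp [h2.1, h2.2, not_lt.mpr (le_of_lt h2.1), not_lt.mpr (le_of_lt h2.2)]
      · rcases not_and_or.mp h1 with h | h <;> rcases not_and_or.mp h2 with h' | h' <;>
          simp [h, h']
  | case2 ts h =>
    match ts, h with
    | [], _ => rfl
    | [_], _ => rfl
    | [_, _], _ => rfl
    | (a :: b :: c :: r), h => exact absurd rfl (h a b c r)

-- ===== VERDICT (by name: the statement is the Claim_ definition above) =====
theorem same_dir_theta_spec : Claim_equal_same_dir_theta := by
  intro ts _
  unfold Spec_same_dir_theta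
  rw [pvA_eq_map, pvMap_eq_triples, pvAlt_eq_triples]
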